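-- pv_equiv track=rewrite | github.com/kinoubenkyou/codiliity | str_symmetry_point.py | solution
-- ===== SOURCE A (Python) =====
-- def solution(S):
--     if not S or len(S) % 2 == 0:
--         return -1
--     i = 0
--     while i < len(S) // 2:
--         if S[i] != S[-i - 1]:
--             return -1
--         i += 1
--     return i
-- ===== SOURCE B (Python) =====
-- def solution(S):
--     if not S or len(S) % 2 == 0:
--         return -1
--     rev = S[::-1]
--     return len(S) // 2 if S == rev else -1
-- ===== Notes on version B (the rewrite author's own statement) =====
-- stated objective: idiomatic
-- what changed: Replaces the index-based two-pointer while loop (with early exit and negative indexing) by building the reversed string S[::-1] and doing one whole-string equality comparison, returning len(S)//2 on match.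
import Mathlib
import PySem

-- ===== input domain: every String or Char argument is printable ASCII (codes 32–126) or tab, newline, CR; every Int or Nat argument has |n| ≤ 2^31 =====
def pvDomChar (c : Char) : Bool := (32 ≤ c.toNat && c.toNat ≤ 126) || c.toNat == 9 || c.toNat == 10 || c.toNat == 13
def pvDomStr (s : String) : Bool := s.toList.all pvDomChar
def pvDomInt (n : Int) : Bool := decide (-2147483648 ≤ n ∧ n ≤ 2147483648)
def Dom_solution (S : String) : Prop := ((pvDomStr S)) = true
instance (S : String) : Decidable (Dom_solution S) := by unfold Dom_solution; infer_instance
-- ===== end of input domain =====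

-- B replaces A's two-pointer while loop by reversing the string and one whole-string equality (idiomatic).

-- ===== PORT A =====
-- the while loop: i increments while i < len//2, early -1 on mismatching ends
def solutionLoop (L : List Char) (i : Nat) : Int :=
  if i < L.length / 2 then
    if PySem.List.pyGet? L (i : Int) ≠ PySem.List.pyGet? L (-(i : Int) - 1) then -1
    else solutionLoop L (i + 1)
  else (i : Int)
termination_by L.length / 2 - i
decreasing_by omega

def solution (S : String) : Int :=
  let L := S.toList
  if L.length = 0 ∨ L.length % 2 = 0 then -1
  else solutionLoop L 0

-- ===== PORT B =====
def solution_alt (S : String) : Int :=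
  let L := S.toList
  if L.length = 0 ∨ L.length % 2 = 0 then -1
  else
    let rev := (PySem.List.slice? L none none (-1)).getD []   -- S[::-1]
    if L = rev then ((L.length / 2 : Nat) : Int) else -1

-- ===== PRECONDITION & SPEC =====
def Spec_solution (S : String) (out : Int) : Prop := out = solution_alt S
instance (S : String) (out : Int) : Decidable (Spec_solution S out) := by unfold Spec_solution; infer_instance

-- ===== CLAIM (what is proved, stated in full; the proofs are below) =====
def Claim_equal_solution : Prop := ∀ (S : String), Dom_solution S → Spec_solution S (solution S)

-- ===== LEMMAS AND PROOFS =====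

lemma solutionLoop_eq (L : List Char) (i : Nat) (hi : i ≤ L.length / 2) :
    solutionLoop L i =
      if ∀ j, i ≤ j → j < L.length / 2 →
          PySem.List.pyGet? L (j : Int) = PySem.List.pyGet? L (-(j : Int) - 1)
      then ((L.length / 2 : Nat) : Int) else -1 := by
  rw [solutionLoop]
  by_cases h : i < L.length / 2
  · simp only [if_pos h]
    by_cases hm : PySem.List.pyGet? L (i : Int) = PySem.List.pyGet? L (-(i : Int) - 1)
    · rw [if_neg (by simpa using hm), solutionLoop_eq L (i+1) (by omega)]
      congr 1
      simp only [eq_iff_iff]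
      constructor
      · intro hall j hij hj
        rcases Nat.lt_or_ge i j with h' | h'
        · exact hall j (by omega) hj
        · have : j = i := by omega
          simpa [this] using hm
      · intro hall j hij hj; exact hall j (by omega) hj
    · rw [if_pos (by simpa using hm), if_neg]
      intro hall
      exact hm (hall i le_rfl h)
  · simp only [if_neg h]
    have hieq : i = L.length / 2 := by omega
    rw [if_pos]
    · simp [hieq]
    · intro j hij hj; omega
termination_by L.length / 2 - i
decreasing_by omega

lemma pyGet?_pair (L : List Char) (j : Nat) (hj : j < L.length) :
    PySem.List.pyGet? L (j : Int) = L[j]? ∧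
    PySem.List.pyGet? L (-(j : Int) - 1) = L[L.length - (j + 1)]? := by
  constructor
  · exact PySem.List.pyGet?_natCast L j
  · have : (-(j : Int) - 1) = -((j + 1 : Nat) : Int) := by push_cast; ring
    rw [this, PySem.List.pyGet?_neg_natCast L (j+1) (by omega) (by omega)]

lemma palindrome_iff_half (L : List Char) :
    (L = L.reverse) ↔
      (∀ j, 0 ≤ j → j < L.length / 2 → L[j]? = L[L.length - (j + 1)]?) := by
  constructor
  · intro h j _ hj
    conv_lhs => rw [h]
    rw [List.getElem?_reverse (by omega)]
    congr 1
    omega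
  · intro h
    apply List.ext_getElem (by simp)
    intro k hk hk'
    rw [List.getElem_reverse]
    rcases Nat.lt_or_ge k (L.length / 2) with hlt | hge
    · have := h k (by omega) hlt
      rw [List.getElem?_eq_getElem hk,
          List.getElem?_eq_getElem (by omega : L.length - (k+1) < L.length)] at this
      simp only [Option.some_inj] at this
      have e : L.length - 1 - k = L.length - (k + 1) := by omega
      simp only [e]
      exact this
    · rcases Nat.lt_or_ge (L.length - (k + 1)) (L.length / 2) with hlt2 | hge2
      · have := h (L.length - (k+1)) (by omega) hlt2
        have e2 : L.length - (L.length - (k+1) + 1) = k := by omega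
        rw [e2, List.getElem?_eq_getElem (by omega : L.length - (k+1) < L.length),
            List.getElem?_eq_getElem hk] at this
        simp only [Option.some_inj] at this
        have e : L.length - 1 - k = L.length - (k + 1) := by omega
        simp only [e]
        exact this.symm
      · -- middle element (odd length): both halves exhausted, k is the center
        have e : L.length - 1 - k = k := by omega
        simp only [e]

-- ===== VERDICT (by name: the statement is the Claim_ definition above) =====
theorem solution_spec : Claim_equal_solution := by
  intro S _
  unfold Spec_solution solution solution_alt
  simp only [PySem.List.slice?_none_none_neg_one, Option.getD_some]
  set L := S.toList with hL
  by_cases hg : L.length = 0 ∨ L.length % 2 = 0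
  · rw [if_pos hg, if_pos hg]
  · rw [if_neg hg, if_neg hg, solutionLoop_eq L 0 (by omega)]
    by_cases hp : L = L.reverse
    · rw [if_pos, if_pos hp]
      intro j _ hj
      have hjl : j < L.length := by omega
      obtain ⟨h1, h2⟩ := pyGet?_pair L j hjl
      rw [h1, h2]
      exact (palindrome_iff_half L).mp hp j (by omega) hj
    · rw [if_neg, if_neg hp]
      intro hall
      apply hp
      rw [palindrome_iff_half L]
      intro j _ hj
      have hjl : j < L.length := by omega
      obtain ⟨h1, h2⟩ := pyGet?_pair L j hjl
      have := hall j (by omega) hj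
      rwa [h1, h2] at this
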